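-- pv_equiv track=rewrite | github.com/stormrider94/codewars_attempt | split_all_even_numbers_to_add_ones_in_different_ways.py | split_equal
-- ===== SOURCE A (Python) =====
-- def split_equal(nums):
--     all_odds_totale = []
--     for num in nums:
--         if num % 2 == 1:
--             all_odds_totale.append(num)
--         else:
--             split_odds = []
--             for i in range(1,num+1):
--                 #if num is divisible by that number and that number is also an odd number
--                 if num % i == 0 and i % 2 == 1:
--                     equal_num = i
--                     n = num // i
--             for i in range(n):
--                 split_odds.append(equal_num)
--             all_odds_totale.extend(split_odds)
--     return all_odds_totale
-- ===== SOURCE B (Python) =====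
-- def split_equal(nums):
--     out = []
--     for num in nums:
--         if num % 2 == 1:
--             out.append(num)
--         else:
--             odd, n = num, 1
--             while odd % 2 == 0:
--                 odd //= 2
--                 n *= 2
--             out.extend([odd] * n)
--     return out
-- ===== Notes on version B (the rewrite author's own statement) =====
-- stated objective: alternative
-- what changed: B computes each even number's largest odd divisor by stripping factors of 2 (O(log num) per element) instead of A's trial scan over range(1, num+1), and keeps no cross-iteration state.
-- outside the precondition, e.g. on split_equal([4, -4]): A returns [1, 1, 1, 1, 1, 1, 1, 1], B returns [1, 1, 1, 1, -1, -1, -1, -1]; on split_equal([4, 0]): A returns [1, 1, 1, 1, 1, 1, 1, 1], B does not finish within the time limit; on split_equal([-4]): A raises NameError, B returns [-1, -1, -1, -1]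
import Mathlib
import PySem

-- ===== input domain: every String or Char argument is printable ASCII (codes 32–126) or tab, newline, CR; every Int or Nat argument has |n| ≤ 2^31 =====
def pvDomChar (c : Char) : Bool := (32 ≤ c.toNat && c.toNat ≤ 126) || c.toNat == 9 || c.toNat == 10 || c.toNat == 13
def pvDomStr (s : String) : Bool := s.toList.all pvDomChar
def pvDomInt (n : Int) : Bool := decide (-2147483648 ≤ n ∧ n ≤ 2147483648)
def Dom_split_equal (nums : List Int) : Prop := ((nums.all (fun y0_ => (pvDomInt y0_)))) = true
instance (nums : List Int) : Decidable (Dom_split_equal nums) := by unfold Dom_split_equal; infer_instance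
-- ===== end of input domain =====

-- B finds each even number's largest odd divisor by stripping factors of 2 instead of A's
-- trial scan over range(1, num+1), and keeps no cross-iteration state.

-- ===== PORT A =====
-- the inner 'for i in range(1, num+1)' updating the function-scoped equal_num / n
def aScan (num : Int) (p : Option Int × Option Int) : Option Int × Option Int :=
  (PySem.List.pyRange 1 (num + 1) 1).foldl
    (fun p i =>
      if PySem.Int.mod num i == 0 && PySem.Int.mod i 2 == 1
      then (some i, some (PySem.Int.floordiv num i)) else p) p

-- one iteration of A's outer loop; state = (all_odds_totale, equal_num, n); the getD 0 defaults
-- stand for Python's NameError (unset variable), which Pre_ excludes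
def aStep (st : List Int × Option Int × Option Int) (num : Int) :
    List Int × Option Int × Option Int :=
  if PySem.Int.mod num 2 == 1 then (st.1 ++ [num], st.2)
  else
    let s := aScan num st.2
    let split_odds := (PySem.List.pyRange 0 (s.2.getD 0) 1).foldl
      (fun l (_ : Int) => l ++ [s.1.getD 0]) []
    (st.1 ++ split_odds, s)

def split_equal (nums : List Int) : List Int :=
  (nums.foldl aStep ([], none, none)).1

-- ===== PORT B =====
-- B's 'while odd % 2 == 0: odd //= 2; n *= 2'; fuel = |odd| is a totality guard only
-- (the loop body runs at most log2 |odd| times for odd ≠ 0; Python diverges at 0, which Pre_ excludes)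
def stripTwos : Nat → Int → Int → Int × Int
  | 0, odd, n => (odd, n)
  | fuel + 1, odd, n =>
    if PySem.Int.mod odd 2 == 0 then stripTwos fuel (PySem.Int.floordiv odd 2) (n * 2)
    else (odd, n)

def bStep (out : List Int) (num : Int) : List Int :=
  if PySem.Int.mod num 2 == 1 then out ++ [num]
  else
    let r := stripTwos num.natAbs num 1
    out ++ List.replicate r.2.toNat r.1

def split_equal_alt (nums : List Int) : List Int :=
  nums.foldl bStep []

-- ===== PRECONDITION & SPEC =====
-- Pre_ excludes exactly the lists containing a nonpositive even number: there A either raises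
-- NameError (no even number was seen before, so equal_num/n are unset — e.g. [-4]) or RETURNS
-- copies of the stale (equal_num, n) left over from the previous even number (e.g. [4, -4]),
-- an accident of function-scoped loop state that no per-element implementation can match;
-- B instead splits such a number by its own largest odd divisor (and B's while-loop diverges on 0).
def Pre_split_equal (nums : List Int) : Prop :=
  ∀ x ∈ nums, x % 2 = 0 → 0 < x
instance (nums : List Int) : Decidable (Pre_split_equal nums) := by
  unfold Pre_split_equal; infer_instance

def pvWitness_split_equal : List Int := [3, 12, -5, 6]

def Spec_split_equal (nums : List Int) (out : List Int) : Prop := out = split_equal_alt nums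
instance (nums : List Int) (out : List Int) : Decidable (Spec_split_equal nums out) := by
  unfold Spec_split_equal; infer_instance

-- ===== CLAIM (what is proved, stated in full; the proofs are below) =====
def Claim_equal_split_equal : Prop := ∀ (nums : List Int), Dom_split_equal nums →
  Pre_split_equal nums → Spec_split_equal nums (split_equal nums)

-- ===== LEMMAS AND PROOFS =====

-- stripTwos (B's while loop) returns the largest odd divisor o of m > 0 and n * (m / o)
theorem stripTwos_spec : ∀ (fuel : Nat) (m n : Int), 0 < m → m.natAbs ≤ fuel →
    0 < (stripTwos fuel m n).1 ∧ (stripTwos fuel m n).1 % 2 = 1 ∧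
    (stripTwos fuel m n).1 ∣ m ∧ (stripTwos fuel m n).2 = n * (m / (stripTwos fuel m n).1) ∧
    (∀ j : Int, j % 2 = 1 → j ∣ m → j ∣ (stripTwos fuel m n).1) := by
  intro fuel
  induction fuel with
  | zero => intro m n hm hf; omega
  | succ fuel ih =>
    intro m n hm hf
    rw [stripTwos, PySem.Int.mod_eq_emod_of_pos (b := 2) (by norm_num),
        PySem.Int.floordiv_eq_ediv_of_pos (b := 2) (by norm_num)]
    by_cases h2 : m % 2 = 0
    · simp only [h2, beq_self_eq_true, if_true]
      have hm2 : 2 ≤ m := by omega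
      have hm' : 0 < m / 2 := by omega
      have hfa : (m / 2).natAbs ≤ fuel := by omega
      obtain ⟨h1, h3, h4, h5, h6⟩ := ih (m / 2) (n * 2) hm' hfa
      set o := (stripTwos fuel (m / 2) (n * 2)).1 with ho
      have hmm : m = 2 * (m / 2) := by omega
      refine ⟨h1, h3, dvd_trans h4 ⟨2, by omega⟩, ?_, ?_⟩
      · rw [h5]
        have hdiv : m / o = 2 * (m / 2 / o) := by
          conv_lhs => rw [hmm]
          exact Int.mul_ediv_assoc 2 h4
        rw [hdiv]; ring
      · intro j hj hjm
        apply h6 j hj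
        obtain ⟨c, hc⟩ := hjm
        have hcm : j * c % 2 = 0 := by rw [← hc]; omega
        have hc2 : c % 2 = 0 := by
          have := Int.mul_emod j c 2
          rw [hj] at this
          omega
        refine ⟨c / 2, ?_⟩
        have h2m : 2 * (m / 2) = 2 * (j * (c / 2)) := by
          rw [← hmm, hc]
          have : c = 2 * (c / 2) := by omega
          conv_lhs => rw [this]
          ring
        omega
    · have : (m % 2 == 0) = false := by simp [h2]
      simp only [this, Bool.false_eq_true, if_false]
      have hodd : m % 2 = 1 := by omega
      exact ⟨hm, hodd, dvd_refl m, by rw [Int.ediv_self (by omega)]; ring, fun j _ hjm => hjm⟩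

-- the keep-last scan is unchanged by elements failing the divisor-and-odd test
theorem aScan_tail (num : Int) (l : List Int) (p : Option Int × Option Int)
    (h : ∀ j ∈ l, ¬((PySem.Int.mod num j == 0 && PySem.Int.mod j 2 == 1) = true)) :
    l.foldl (fun p i =>
      if PySem.Int.mod num i == 0 && PySem.Int.mod i 2 == 1
      then (some i, some (PySem.Int.floordiv num i)) else p) p = p := by
  induction l generalizing p with
  | nil => rfl
  | cons x xs ih =>
    rw [List.foldl_cons, if_neg (h x List.mem_cons_self)]
    exact ih p (fun j hj => h j (List.mem_cons_of_mem x hj))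

-- for a positive even num, A's scan lands on exactly B's stripped pair, whatever the stale state was
theorem aScan_eq (num : Int) (hpos : 0 < num) (p : Option Int × Option Int) :
    aScan num p = (some (stripTwos num.natAbs num 1).1, some (stripTwos num.natAbs num 1).2) := by
  obtain ⟨h1, h3, h4, h5, h6⟩ := stripTwos_spec num.natAbs num 1 hpos le_rfl
  set o := (stripTwos num.natAbs num 1).1 with ho
  have hle : o ≤ num := Int.le_of_dvd hpos h4
  unfold aScan
  rw [PySem.List.pyRange_one_append 1 (o + 1) (num + 1) (by omega) (by omega),
      PySem.List.pyRange_one_succ_right (by omega : (1:Int) ≤ o), List.foldl_append,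
      List.foldl_append]
  rw [aScan_tail num _ _ ?_]
  · rw [List.foldl_cons, List.foldl_nil, if_pos ?_]
    · rw [h5, one_mul, PySem.Int.floordiv_eq_ediv_of_pos h1]
    · rw [Bool.and_eq_true, beq_iff_eq, beq_iff_eq,
        PySem.Int.mod_eq_emod_of_pos h1, PySem.Int.mod_eq_emod_of_pos (by norm_num : (0:Int) < 2)]
      exact ⟨Int.emod_eq_zero_of_dvd h4, h3⟩
  · intro j hj
    rw [PySem.List.mem_pyRange_one] at hj
    intro hc
    rw [Bool.and_eq_true, beq_iff_eq, beq_iff_eq,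
      PySem.Int.mod_eq_emod_of_pos (by omega : (0:Int) < j),
      PySem.Int.mod_eq_emod_of_pos (by norm_num : (0:Int) < 2)] at hc
    have hjd : j ∣ num := by
      have := hc.1; exact Int.dvd_of_emod_eq_zero this
    have := Int.le_of_dvd (by omega) (h6 j hc.2 hjd)
    omega

-- main loop invariant: on lists of odd-or-positive numbers the two folds agree
theorem main_fold : ∀ (nums : List Int),
    (∀ x ∈ nums, x % 2 = 1 ∨ (x % 2 = 0 ∧ 0 < x)) →
    ∀ (acc : List Int) (s : Option Int × Option Int),
      (nums.foldl aStep (acc, s)).1 = nums.foldl bStep acc := by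
  intro nums
  induction nums with
  | nil => intro _ acc s; rfl
  | cons x xs ih =>
    intro h acc s
    have hx := h x List.mem_cons_self
    have hxs := fun y hy => h y (List.mem_cons_of_mem x hy)
    rw [List.foldl_cons, List.foldl_cons]
    have hmod : PySem.Int.mod x 2 = x % 2 := PySem.Int.mod_eq_emod_of_pos (by norm_num)
    rcases hx with hodd | ⟨heven, hpos⟩
    · rw [show aStep (acc, s) x = (acc ++ [x], s) from by
          unfold aStep; rw [if_pos (by rw [hmod, hodd]; rfl)],
        show bStep acc x = acc ++ [x] from by
          unfold bStep; rw [if_pos (by rw [hmod, hodd]; rfl)]]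
      exact ih hxs _ _
    · have hcond : (PySem.Int.mod x 2 == 1) = false := by
        rw [hmod, heven]; rfl
      have hA : aStep (acc, s) x =
          (acc ++ List.replicate (stripTwos x.natAbs x 1).2.toNat (stripTwos x.natAbs x 1).1,
           some (stripTwos x.natAbs x 1).1, some (stripTwos x.natAbs x 1).2) := by
        unfold aStep
        rw [hcond]
        simp only [Bool.false_eq_true, if_false, aScan_eq x hpos s]
        rw [PySem.List.foldl_append_singleton_eq_map]
        simp [List.map_const', PySem.List.length_pyRange_one]
      have hB : bStep acc x =
          acc ++ List.replicate (stripTwos x.natAbs x 1).2.toNat (stripTwos x.natAbs x 1).1 := by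
        unfold bStep; rw [hcond]; simp
      rw [hA, hB]
      exact ih hxs _ _

-- ===== VERDICT (by name: the statement is the Claim_ definition above) =====
theorem split_equal_spec : Claim_equal_split_equal := by
  intro nums _ hPre
  unfold Spec_split_equal split_equal split_equal_alt
  apply main_fold
  intro x hx
  have hpos := hPre x hx
  have := Int.emod_two_eq x
  omega
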